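-- pv_equiv track=rewrite | github.com/KavirSingh11/Focused-Crawler | calcSim.py | urlSim
-- ===== SOURCE A (Python) =====
-- def urlSim(url , query):
--
--     result = 0
--     hits = 0
--     for i in query:
--         for x in url:
--             if query[i] == url[x]: hits += 1
--
--     if hits > 2: return True
--     else: return False
-- ===== SOURCE B (Python) =====
-- def urlSim(url, query):
--     cnt = {}
--     for v in url.values():
--         cnt[v] = cnt.get(v, 0) + 1
--     hits = 0
--     for v in query.values():
--         hits += cnt.get(v, 0)
--     return hits > 2
-- ===== Notes on version B (the rewrite author's own statement) =====
-- stated objective: faster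
-- what changed: Replaces the nested loop over all (query key, url key) pairs by a single frequency map of url values, then one pass summing lookups over query values.
import Mathlib
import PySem

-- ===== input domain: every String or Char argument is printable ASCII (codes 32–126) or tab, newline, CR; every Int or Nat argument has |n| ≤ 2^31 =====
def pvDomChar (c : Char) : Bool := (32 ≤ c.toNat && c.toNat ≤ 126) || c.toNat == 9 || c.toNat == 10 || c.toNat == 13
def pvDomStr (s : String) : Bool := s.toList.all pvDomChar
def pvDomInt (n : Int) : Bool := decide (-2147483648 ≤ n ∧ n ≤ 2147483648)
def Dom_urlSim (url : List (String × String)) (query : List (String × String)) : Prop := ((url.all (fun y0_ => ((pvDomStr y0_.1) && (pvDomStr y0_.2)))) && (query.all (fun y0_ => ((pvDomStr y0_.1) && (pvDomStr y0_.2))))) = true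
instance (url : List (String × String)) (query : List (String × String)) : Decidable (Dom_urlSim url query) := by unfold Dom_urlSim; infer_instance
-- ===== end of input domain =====

-- One honest line: B replaces A's nested loop over all key pairs by a frequency map of url values plus one summing pass (asymptotically faster).

-- ===== PORT A =====
-- 'for i in query: for x in url: if query[i] == url[x]: hits += 1' — lookups via the dict view of the assoc lists
def urlSim (url : List (String × String)) (query : List (String × String)) : Bool :=
  -- result = 0 (dead variable in A)
  let hits : Int := query.foldl (fun hits i =>
    url.foldl (fun hits x =>
      if PySem.Dict.get? (PySem.Dict.mk query) i.1 == PySem.Dict.get? (PySem.Dict.mk url) x.1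
      then hits + 1 else hits) hits) 0
  if hits > 2 then true else false

-- ===== PORT B =====
def urlSim_alt (url : List (String × String)) (query : List (String × String)) : Bool :=
  let cnt : PySem.Dict String Int :=
    url.foldl (fun d p => d.insert p.2 (d.getD p.2 0 + 1)) PySem.Dict.empty
  let hits : Int := query.foldl (fun s p => s + cnt.getD p.2 0) 0
  decide (hits > 2)

-- ===== PRECONDITION & SPEC =====
-- Pre_ excludes assoc lists with duplicate keys: they do not represent a Python dict (dict construction collapses duplicates), so A's behaviour on them is not defined by the source.
def Pre_urlSim (url : List (String × String)) (query : List (String × String)) : Prop :=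
  (url.map Prod.fst).Nodup ∧ (query.map Prod.fst).Nodup
instance (url : List (String × String)) (query : List (String × String)) : Decidable (Pre_urlSim url query) := by unfold Pre_urlSim; infer_instance
def pvWitness_urlSim : (List (String × String)) × (List (String × String)) :=
  ([("a", "x"), ("b", "x"), ("c", "x")], [("q", "x")])

def Spec_urlSim (url : List (String × String)) (query : List (String × String)) (out : Bool) : Prop := out = urlSim_alt url query
instance (url : List (String × String)) (query : List (String × String)) (out : Bool) : Decidable (Spec_urlSim url query out) := by unfold Spec_urlSim; infer_instance

-- ===== CLAIM (what is proved, stated in full; the proofs are below) =====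
def Claim_equal_urlSim : Prop := ∀ (url : List (String × String)) (query : List (String × String)), Dom_urlSim url query → Pre_urlSim url query → Spec_urlSim url query (urlSim url query)

-- ===== LEMMAS AND PROOFS =====

-- lookup in the dict view of a nodup-key assoc list returns that pair's value
theorem pv_get?_mk_of_mem {p : String × String} {l : List (String × String)}
    (hmem : p ∈ l) (hnd : (l.map Prod.fst).Nodup) :
    PySem.Dict.get? (PySem.Dict.mk l) p.1 = some p.2 := by
  apply PySem.Dict.get?_of_mem_items
  · exact hmem
  · simpa [PySem.Dict.keys] using hnd

-- A's hits equal the sum over query pairs of the number of url pairs with the same value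
theorem pv_hits_A (url query : List (String × String))
    (hu : (url.map Prod.fst).Nodup) (hq : (query.map Prod.fst).Nodup) :
    query.foldl (fun hits i =>
      url.foldl (fun hits x =>
        if PySem.Dict.get? (PySem.Dict.mk query) i.1 == PySem.Dict.get? (PySem.Dict.mk url) x.1
        then hits + 1 else hits) hits) (0 : Int)
    = (query.map (fun i => ((url.map Prod.snd).count i.2 : Int))).sum := by
  rw [PySem.List.foldl_congr_mem (g := fun hits i => hits + ((url.map Prod.snd).count i.2 : Int))]
  · rw [PySem.List.foldl_add]; simp
  · intro acc i hi
    rw [PySem.List.foldl_congr_mem (g := fun hits x => if i.2 == x.2 then hits + 1 else hits)]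
    · rw [PySem.List.foldl_if_add_one]
      congr 1
      rw [List.count_eq_countP, List.countP_map]
      norm_cast
      apply List.countP_congr
      intro x _
      simp only [Function.comp, beq_iff_eq]
      exact eq_comm
    · intro acc' x hx
      rw [pv_get?_mk_of_mem hi hq, pv_get?_mk_of_mem hx hu]
      simp

-- B's hits equal the same sum
theorem pv_hits_B (url query : List (String × String)) :
    query.foldl (fun s p =>
      s + (url.foldl (fun d p => d.insert p.2 (d.getD p.2 0 + 1))
            (PySem.Dict.empty : PySem.Dict String Int)).getD p.2 0) (0 : Int)
    = (query.map (fun i => ((url.map Prod.snd).count i.2 : Int))).sum := by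
  have hcnt : ∀ v : String,
      (url.foldl (fun d p => d.insert p.2 (d.getD p.2 0 + 1))
        (PySem.Dict.empty : PySem.Dict String Int)).getD v 0
      = ((url.map Prod.snd).count v : Int) := by
    intro v
    rw [← List.foldl_map (f := Prod.snd)
        (g := fun d v => PySem.Dict.insert d v (d.getD v 0 + 1)),
      PySem.Dict.getD_foldl_insert_add_one]
    simp
  rw [PySem.List.foldl_congr_mem
      (g := fun s p => s + ((url.map Prod.snd).count p.2 : Int))]
  · rw [PySem.List.foldl_add]; simp
  · intro acc p _
    rw [hcnt]

-- ===== VERDICT (by name: the statement is the Claim_ definition above) =====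
theorem urlSim_spec : Claim_equal_urlSim := by
  intro url query _ hpre
  simp only [Spec_urlSim, urlSim, urlSim_alt]
  rw [pv_hits_A url query hpre.1 hpre.2, pv_hits_B url query]
  by_cases h : (query.map (fun i => ((url.map Prod.snd).count i.2 : Int))).sum > 2 <;>
    simp [h]
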